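-- pv_equiv track=rewrite | github.com/steven-studio/mini-ir-register-allocator | liveness.py | liveness_analysis
-- ===== SOURCE A (Python) =====
-- def liveness_analysis(ir):
--     uses = {}
--     for idx, line in enumerate(ir):
--         tokens = line.replace('=', ' ').replace('+', ' ').replace('*', ' ').replace('return', ' ').split()
--         for t in tokens:
--             if t.isalpha():
--                 if t not in uses:
--                     uses[t] = [idx, idx]
--                 else:
--                     uses[t][1] = idx
--     return uses
-- ===== SOURCE B (Python) =====
-- def liveness_analysis(ir):
--     # Two independent first-match scans: a forward scan records each variable's
--     # first use line, a backward scan records its last use line (first match in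
--     # reverse order); the results are zipped per variable in first-use order.
--     def variables(line):
--         toks = line.replace('=', ' ').replace('+', ' ').replace('*', ' ').replace('return', ' ').split()
--         return [t for t in toks if t.isalpha()]
--
--     first = {}
--     for idx, line in enumerate(ir):
--         for t in variables(line):
--             if t not in first:
--                 first[t] = idx
--
--     last = {}
--     for idx, line in reversed(list(enumerate(ir))):
--         for t in variables(line):
--             if t not in last:
--                 last[t] = idx
--
--     return {v: [f, last[v]] for v, f in first.items()}
-- ===== Notes on version B (the rewrite author's own statement) =====
-- stated objective: alternative
-- what changed: B replaces A's single stateful pass that mutates a [first,last] pair on every token with two independent stateless first-match scans: a forward scan yields each variable's first use line, a backward scan over the reversed program yields its last use line, and a final zip builds the result.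
import Mathlib
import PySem

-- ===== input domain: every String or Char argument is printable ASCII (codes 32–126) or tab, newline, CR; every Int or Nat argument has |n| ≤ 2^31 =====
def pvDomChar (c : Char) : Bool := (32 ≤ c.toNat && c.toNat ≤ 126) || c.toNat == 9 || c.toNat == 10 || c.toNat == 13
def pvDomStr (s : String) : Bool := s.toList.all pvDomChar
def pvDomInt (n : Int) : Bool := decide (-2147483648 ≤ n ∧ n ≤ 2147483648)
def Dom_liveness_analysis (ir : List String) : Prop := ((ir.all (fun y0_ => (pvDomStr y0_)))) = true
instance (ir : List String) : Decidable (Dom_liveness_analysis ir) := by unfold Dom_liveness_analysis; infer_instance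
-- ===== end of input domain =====

-- B replaces A's single stateful scan (mutating a [first,last] pair per token) by two
-- independent first-match scans — forward for first use, backward for last use — zipped
-- per variable at the end; objective: alternative decomposition.

-- tokenization shared by both sources:
-- line.replace('=',' ').replace('+',' ').replace('*',' ').replace('return',' ').split()
def pvTokens (line : String) : List String :=
  PySem.Str.split₀ (PySem.Str.replace (PySem.Str.replace (PySem.Str.replace
    (PySem.Str.replace line "=" " ") "+" " ") "*" " ") "return" " ")

-- ===== PORT A =====
def liveness_analysis (ir : List String) : List (String × List Int) :=
  ((PySem.List.enumerate ir).foldl (fun uses p =>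
      (pvTokens p.2).foldl (fun d t =>
        if PySem.Str.strIsalpha t then
          if d.contains t then
            -- uses[t][1] = idx : in-place write at index 1 of the 2-element list
            d.insert t ((d.getD t []).set 1 p.1)
          else d.insert t [p.1, p.1]
        else d) uses)
    PySem.Dict.empty).items

-- ===== PORT B =====
-- B's helper variables(line): tokens filtered down to the alphabetic ones
def pvVariables (line : String) : List String :=
  (pvTokens line).filter (fun t => PySem.Str.strIsalpha t)

def liveness_analysis_alt (ir : List String) : List (String × List Int) :=
  let first := (PySem.List.enumerate ir).foldl (fun d p =>
      (pvVariables p.2).foldl (fun d t =>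
        if d.contains t then d else d.insert t p.1) d)
    PySem.Dict.empty
  let last := ((PySem.List.enumerate ir).reverse).foldl (fun d p =>
      (pvVariables p.2).foldl (fun d t =>
        if d.contains t then d else d.insert t p.1) d)
    PySem.Dict.empty
  -- last[v]: every key of `first` is a key of `last`, so the default is never used
  first.items.map (fun q => (q.1, [q.2, last.getD q.1 0]))

-- ===== PRECONDITION & SPEC =====
def Spec_liveness_analysis (ir : List String) (out : List (String × List Int)) : Prop := out = liveness_analysis_alt ir
instance (ir : List String) (out : List (String × List Int)) : Decidable (Spec_liveness_analysis ir out) := by unfold Spec_liveness_analysis; infer_instance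

-- ===== CLAIM (what is proved, stated in full; the proofs are below) =====
def Claim_equal_liveness_analysis : Prop := ∀ (ir : List String), Dom_liveness_analysis ir → Spec_liveness_analysis ir (liveness_analysis ir)

-- ===== LEMMAS AND PROOFS =====

-- step functions of the two scans, at a fixed line index i
def pvGA (i : Int) (d : PySem.Dict String (List Int)) (t : String) : PySem.Dict String (List Int) :=
  if d.contains t then d.insert t ((d.getD t []).set 1 i) else d.insert t [i, i]

def pvGF (i : Int) (d : PySem.Dict String Int) (t : String) : PySem.Dict String Int :=
  if d.contains t then d else d.insert t i

-- first line index (in P's order) whose variable list contains t; 0 if none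
def pvFirstIdx (P : List (Int × String)) (t : String) : Int :=
  ((P.find? (fun p => (pvVariables p.2).contains t)).map Prod.fst).getD 0

def pvOccurs (P : List (Int × String)) (t : String) : Bool :=
  P.any (fun p => (pvVariables p.2).contains t)


-- one step of each scan, pointwise
theorem pvGA_contains (i : Int) (d : PySem.Dict String (List Int)) (s t : String) :
    (pvGA i d s).contains t = (t == s || d.contains t) := by
  unfold pvGA; split_ifs <;> rw [PySem.Dict.contains_insert]

theorem pvGA_getD (i : Int) (d : PySem.Dict String (List Int)) (s t : String) :
    (pvGA i d s).getD t [] =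
      if t = s then (if d.contains s then (d.getD s []).set 1 i else [i, i])
      else d.getD t [] := by
  unfold pvGA
  by_cases hc : d.contains s <;> by_cases h : t = s <;>
    simp [PySem.Dict.getD_insert, h, hc]

theorem pvGF_contains (i : Int) (d : PySem.Dict String Int) (s t : String) :
    (pvGF i d s).contains t = (t == s || d.contains t) := by
  unfold pvGF
  split_ifs with hc
  · by_cases h : t = s <;> simp [h, hc]
  · rw [PySem.Dict.contains_insert]

theorem pvGF_getD (i : Int) (d : PySem.Dict String Int) (s t : String) :
    (pvGF i d s).getD t 0 =
      if t = s then (if d.contains s then d.getD s 0 else i)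
      else d.getD t 0 := by
  unfold pvGF
  by_cases hc : d.contains s <;> by_cases h : t = s <;>
    simp [PySem.Dict.getD_insert, h, hc]

theorem pvLineA_contains (i : Int) (vs : List String) (d : PySem.Dict String (List Int)) (t : String) :
    (vs.foldl (pvGA i) d).contains t = (d.contains t || vs.contains t) := by
  induction vs generalizing d with
  | nil => simp
  | cons s rest ih =>
    simp only [List.foldl_cons, ih, pvGA_contains, List.contains_cons]
    by_cases h : t = s <;> simp [h, Bool.or_left_comm, Bool.or_assoc]

theorem pvLineA_getD (i : Int) (vs : List String) (d : PySem.Dict String (List Int)) (t : String) :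
    (vs.foldl (pvGA i) d).getD t [] =
      if t ∈ vs then (if d.contains t then (d.getD t []).set 1 i else [i, i])
      else d.getD t [] := by
  induction vs generalizing d with
  | nil => simp
  | cons s rest ih =>
    simp only [List.foldl_cons, ih, pvGA_contains, pvGA_getD, List.mem_cons]
    by_cases h : t = s
    · subst h
      by_cases hc : d.contains t <;> by_cases hr : t ∈ rest <;>
        simp [hc, hr, List.set_set, List.set]
    · by_cases hr : t ∈ rest <;> simp [h, hr]

theorem pvLineF_contains (i : Int) (vs : List String) (d : PySem.Dict String Int) (t : String) :
    (vs.foldl (pvGF i) d).contains t = (d.contains t || vs.contains t) := by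
  induction vs generalizing d with
  | nil => simp
  | cons s rest ih =>
    simp only [List.foldl_cons, ih, pvGF_contains, List.contains_cons]
    by_cases h : t = s <;> simp [h, Bool.or_left_comm, Bool.or_assoc]

theorem pvLineF_getD (i : Int) (vs : List String) (d : PySem.Dict String Int) (t : String) :
    (vs.foldl (pvGF i) d).getD t 0 =
      if d.contains t then d.getD t 0
      else if t ∈ vs then i else d.getD t 0 := by
  induction vs generalizing d with
  | nil => simp
  | cons s rest ih =>
    simp only [List.foldl_cons, ih, pvGF_contains, pvGF_getD, List.mem_cons]
    by_cases h : t = s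
    · subst h
      by_cases hc : d.contains t <;> by_cases hr : t ∈ rest <;> simp [hc, hr]
    · by_cases hr : t ∈ rest <;> by_cases hc : d.contains t <;> simp [h, hr, hc]

-- pvFirstIdx / pvOccurs structure
theorem pvOccurs_cons (p : Int × String) (P : List (Int × String)) (t : String) :
    pvOccurs (p :: P) t = ((pvVariables p.2).contains t || pvOccurs P t) := by
  simp [pvOccurs]

theorem pvOccurs_reverse (P : List (Int × String)) (t : String) :
    pvOccurs P.reverse t = pvOccurs P t := by
  simp [pvOccurs]

theorem pvFirstIdx_cons_pos {p : Int × String} {t : String} (P : List (Int × String))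
    (h : (pvVariables p.2).contains t = true) : pvFirstIdx (p :: P) t = p.1 := by
  have h' : decide (t ∈ pvVariables p.2) = true := by simpa using h
  simp [pvFirstIdx, h']

theorem pvFirstIdx_cons_neg {p : Int × String} {t : String} (P : List (Int × String))
    (h : (pvVariables p.2).contains t = false) : pvFirstIdx (p :: P) t = pvFirstIdx P t := by
  have h' : decide (t ∈ pvVariables p.2) = false := by simpa using h
  simp [pvFirstIdx, h']

theorem pvFind?_eq_none_of_not_occurs {P : List (Int × String)} {t : String}
    (h : pvOccurs P t = false) :
    P.find? (fun p => (pvVariables p.2).contains t) = none := by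
  rw [List.find?_eq_none]
  intro x hx
  simp only [pvOccurs, List.any_eq_false] at h
  simpa using h x hx

set_option maxHeartbeats 1000000 in
theorem pvFirstIdx_reverse_cons (p : Int × String) (P : List (Int × String)) (t : String) :
    pvFirstIdx (p :: P).reverse t =
      if pvOccurs P t then pvFirstIdx P.reverse t
      else pvFirstIdx [p] t := by
  rw [List.reverse_cons]
  by_cases h : pvOccurs P t = true
  · obtain ⟨x, hx, hxt⟩ : ∃ x ∈ P.reverse, decide (t ∈ pvVariables x.2) = true := by
      simpa [pvOccurs, List.any_eq_true] using h
    have hfs : (List.find? (fun q => (pvVariables q.2).contains t) P.reverse).isSome = true :=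
      List.find?_isSome.mpr ⟨x, hx, by simpa using hxt⟩
    obtain ⟨y, hy⟩ := Option.isSome_iff_exists.mp hfs
    unfold pvFirstIdx
    rw [List.find?_append, hy, if_pos h, Option.some_or]
  · have h2 : pvOccurs P t = false := by simpa using h
    have hn := pvFind?_eq_none_of_not_occurs (P := P.reverse) (t := t)
      (by rw [pvOccurs_reverse]; exact h2)
    unfold pvFirstIdx
    rw [List.find?_append, hn, if_neg (by simp [h2]), Option.none_or]

-- A's whole scan, pointwise
theorem pvFirstIdx_reverse_snoc (p : Int × String) (P : List (Int × String)) (t : String) :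
    pvFirstIdx (P.reverse ++ [p]) t =
      if pvOccurs P t then pvFirstIdx P.reverse t else pvFirstIdx [p] t := by
  rw [← List.reverse_cons]
  exact pvFirstIdx_reverse_cons p P t

theorem pvFoldA_getD (P : List (Int × String)) (d : PySem.Dict String (List Int)) (t : String) :
    (P.foldl (fun u p => (pvVariables p.2).foldl (pvGA p.1) u) d).getD t [] =
      if pvOccurs P t then
        (if d.contains t then (d.getD t []).set 1 (pvFirstIdx P.reverse t)
         else [pvFirstIdx P t, pvFirstIdx P.reverse t])
      else d.getD t [] := by
  induction P generalizing d with
  | nil => simp [pvOccurs]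
  | cons p P ih =>
    simp only [List.foldl_cons, ih]
    by_cases hp : t ∈ pvVariables p.2
    · have hpb : (pvVariables p.2).contains t = true := by simpa using hp
      by_cases hP : pvOccurs P t = true
      · by_cases hc : d.contains t = true <;>
          simp [pvLineA_getD, pvLineA_contains, pvOccurs_cons, hpb, hp, hP, hc,
            pvFirstIdx_cons_pos, pvFirstIdx_reverse_snoc, List.set_set, List.set]
      · have hP2 : pvOccurs P t = false := by simpa using hP
        by_cases hc : d.contains t = true <;>
          simp [pvLineA_getD, pvLineA_contains, pvOccurs_cons, hpb, hp, hP2, hc,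
            pvFirstIdx_cons_pos, pvFirstIdx_reverse_snoc, List.set_set, List.set]
    · have hpb : (pvVariables p.2).contains t = false := by simpa using hp
      by_cases hP : pvOccurs P t = true <;>
        simp [pvLineA_getD, pvLineA_contains, pvOccurs_cons, hpb, hp, hP,
          pvFirstIdx_cons_neg, pvFirstIdx_reverse_snoc]

-- B's first-match scan, pointwise (same shape forward and backward)
theorem pvFoldF_getD (P : List (Int × String)) (d : PySem.Dict String Int) (t : String) :
    (P.foldl (fun u p => (pvVariables p.2).foldl (pvGF p.1) u) d).getD t 0 =
      if d.contains t then d.getD t 0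
      else if pvOccurs P t then pvFirstIdx P t else d.getD t 0 := by
  induction P generalizing d with
  | nil => simp [pvOccurs]
  | cons p P ih =>
    simp only [List.foldl_cons, ih]
    by_cases hp : t ∈ pvVariables p.2
    · have hpb : (pvVariables p.2).contains t = true := by simpa using hp
      by_cases hP : pvOccurs P t = true <;> by_cases hc : d.contains t = true <;>
        simp [pvLineF_getD, pvLineF_contains, pvOccurs_cons, hpb, hp, hP, hc,
          pvFirstIdx_cons_pos]
    · have hpb : (pvVariables p.2).contains t = false := by simpa using hp
      by_cases hP : pvOccurs P t = true <;> by_cases hc : d.contains t = true <;>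
        simp [pvLineF_getD, pvLineF_contains, pvOccurs_cons, hpb, hp, hP, hc,
          pvFirstIdx_cons_neg]

-- keys of both scans, in order: the distinct variables in first-occurrence order
theorem pvGA_eq_insert (i : Int) :
    pvGA i = (fun d x => d.insert x (if d.contains x then (d.getD x []).set 1 i else [i, i])) := by
  funext d x
  unfold pvGA
  split_ifs with h <;> simp

theorem pvLineA_keys (i : Int) (vs : List String) (d : PySem.Dict String (List Int)) :
    (vs.foldl (pvGA i) d).keys = PySem.Set.update d.keys vs := by
  rw [pvGA_eq_insert, PySem.Dict.keys_foldl_insert]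

theorem pvLineF_keys (i : Int) (vs : List String) (d : PySem.Dict String Int) :
    (vs.foldl (pvGF i) d).keys = PySem.Set.update d.keys vs := by
  induction vs generalizing d with
  | nil => simp [PySem.Set.update]
  | cons s rest ih =>
    have hstep : (pvGF i d s).keys = PySem.Set.add d.keys s := by
      unfold pvGF
      split_ifs with h
      · exact (PySem.Set.add_of_mem ((PySem.Dict.contains_iff_mem_keys d s).mp h)).symm
      · rw [PySem.Dict.keys_insert_of_not_contains d _ (by simpa using h)]
        exact (PySem.Set.add_of_not_mem (fun hm =>
          (by simpa [h] using (PySem.Dict.contains_iff_mem_keys d s).mpr hm))).symm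
    simp only [List.foldl_cons, ih, hstep, PySem.Set.update_cons]

theorem pvFoldA_keys (P : List (Int × String)) (d : PySem.Dict String (List Int)) :
    (P.foldl (fun u p => (pvVariables p.2).foldl (pvGA p.1) u) d).keys
      = PySem.Set.update d.keys (P.flatMap (fun p => pvVariables p.2)) := by
  induction P generalizing d with
  | nil => simp [PySem.Set.update]
  | cons p P ih =>
    simp only [List.foldl_cons, ih, pvLineA_keys, List.flatMap_cons, PySem.Set.update_append]

theorem pvFoldF_keys (P : List (Int × String)) (d : PySem.Dict String Int) :
    (P.foldl (fun u p => (pvVariables p.2).foldl (pvGF p.1) u) d).keys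
      = PySem.Set.update d.keys (P.flatMap (fun p => pvVariables p.2)) := by
  induction P generalizing d with
  | nil => simp [PySem.Set.update]
  | cons p P ih =>
    simp only [List.foldl_cons, ih, pvLineF_keys, List.flatMap_cons, PySem.Set.update_append]

-- A's inner token loop with its isalpha guard is the pvVariables loop
theorem pvLineA_if_filter (i : Int) (sline : String) (d : PySem.Dict String (List Int)) :
    (pvTokens sline).foldl (fun d t =>
        if PySem.Str.strIsalpha t then
          if d.contains t then d.insert t ((d.getD t []).set 1 i)
          else d.insert t [i, i]
        else d) d
      = (pvVariables sline).foldl (pvGA i) d := by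
  unfold pvVariables pvGA
  rw [PySem.List.foldl_if_eq_foldl_filter]

-- the two scans assembled
theorem pvMain (E : List (Int × String)) :
    (E.foldl (fun u p => (pvVariables p.2).foldl (pvGA p.1) u) PySem.Dict.empty).items =
      (E.foldl (fun u p => (pvVariables p.2).foldl (pvGF p.1) u) PySem.Dict.empty).items.map
        (fun q => (q.1,
          [q.2, (E.reverse.foldl (fun u p => (pvVariables p.2).foldl (pvGF p.1) u)
                  PySem.Dict.empty).getD q.1 0])) := by
  set u := E.foldl (fun u p => (pvVariables p.2).foldl (pvGA p.1) u) PySem.Dict.empty with hu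
  set f := E.foldl (fun u p => (pvVariables p.2).foldl (pvGF p.1) u) PySem.Dict.empty with hf
  set l := E.reverse.foldl (fun u p => (pvVariables p.2).foldl (pvGF p.1) u) PySem.Dict.empty with hl
  have hukeys : u.keys = PySem.Set.ofList (E.flatMap (fun p => pvVariables p.2)) := by
    rw [hu, pvFoldA_keys, PySem.Dict.keys_empty, PySem.Set.update_nil_left]
  have hfkeys : f.keys = PySem.Set.ofList (E.flatMap (fun p => pvVariables p.2)) := by
    rw [hf, pvFoldF_keys, PySem.Dict.keys_empty, PySem.Set.update_nil_left]
  have hund : u.keys.Nodup := by rw [hukeys]; exact PySem.Set.nodup_ofList _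
  have hfnd : f.keys.Nodup := by rw [hfkeys]; exact PySem.Set.nodup_ofList _
  rw [PySem.Dict.items_eq_map_keys u hund ([] : List Int),
      PySem.Dict.items_eq_map_keys f hfnd (0 : Int), List.map_map, hukeys, hfkeys]
  refine List.map_congr_left (fun k hk => ?_)
  have hocc : pvOccurs E k = true := by
    obtain ⟨p, hp, hkp⟩ := List.mem_flatMap.mp ((PySem.Set.mem_ofList _ _).mp hk)
    exact List.any_eq_true.mpr ⟨p, hp, by simpa using hkp⟩
  have hu1 : u.getD k [] = [pvFirstIdx E k, pvFirstIdx E.reverse k] := by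
    rw [hu, pvFoldA_getD]
    simp [hocc, PySem.Dict.contains_empty]
  have hf1 : f.getD k 0 = pvFirstIdx E k := by
    rw [hf, pvFoldF_getD]
    simp [hocc, PySem.Dict.contains_empty]
  have hl1 : l.getD k 0 = pvFirstIdx E.reverse k := by
    rw [hl, pvFoldF_getD]
    simp [pvOccurs_reverse, hocc, PySem.Dict.contains_empty]
  simp [Function.comp, hu1, hf1, hl1]

-- ===== VERDICT (by name: the statement is the Claim_ definition above) =====
theorem liveness_analysis_spec : Claim_equal_liveness_analysis := by
  intro ir _
  show liveness_analysis ir = liveness_analysis_alt ir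
  have h1 : liveness_analysis ir = ((PySem.List.enumerate ir).foldl
      (fun u p => (pvVariables p.2).foldl (pvGA p.1) u) PySem.Dict.empty).items := by
    unfold liveness_analysis
    simp only [pvLineA_if_filter]
  rw [h1]
  exact pvMain (PySem.List.enumerate ir)
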